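-- pv_equiv track=rewrite | github.com/aboutroots/aoc2023 | day12.py | get_known_groups_of_hashes
-- ===== SOURCE A (Python) =====
-- def get_known_groups_of_hashes(hidden_spring):
--     result = []
--     current_subgroup = 0
--     for elem in hidden_spring:
--         if elem == "?":
--             # if current_subgroup > 0:
--             #     result.append(current_subgroup)
--             return result
--         if elem == "#":
--             current_subgroup += 1
--         if elem == ".":
--             if current_subgroup > 0:
--                 result.append(current_subgroup)
--                 current_subgroup = 0
--     if current_subgroup > 0:
--         result.append(current_subgroup)
--     return result
-- ===== SOURCE B (Python) =====
-- def get_known_groups_of_hashes(hidden_spring):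
--     parts = hidden_spring.split("?", 1)
--     segments = parts[0].split(".")
--     if len(parts) == 2:
--         # a '?' follows: the group adjacent to it is not fully known, drop it
--         segments = segments[:-1]
--     return [seg.count("#") for seg in segments if "#" in seg]
-- ===== Notes on version B (the rewrite author's own statement) =====
-- stated objective: idiomatic
-- what changed: Replaces the character-by-character state machine (result list + running group counter with early return at '?') by a declarative pipeline: split off the pre-'?' prefix, split it on '.', drop the segment adjacent to a '?', and count '#' per remaining segment with a comprehension.
import Mathlib
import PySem

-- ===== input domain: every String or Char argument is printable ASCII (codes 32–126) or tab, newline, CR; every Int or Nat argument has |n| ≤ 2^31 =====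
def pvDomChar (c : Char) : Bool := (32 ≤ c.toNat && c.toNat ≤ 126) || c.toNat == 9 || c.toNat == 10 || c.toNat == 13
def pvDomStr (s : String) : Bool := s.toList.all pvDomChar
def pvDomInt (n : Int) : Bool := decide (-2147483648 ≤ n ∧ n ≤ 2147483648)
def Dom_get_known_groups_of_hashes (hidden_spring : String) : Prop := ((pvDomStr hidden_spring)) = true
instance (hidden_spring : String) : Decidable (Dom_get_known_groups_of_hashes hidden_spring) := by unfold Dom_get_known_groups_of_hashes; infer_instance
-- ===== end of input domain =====

-- B re-implements A's character state machine as a split/filter/count pipeline (idiomatic; the timing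
-- run measured it faster by a constant factor: C-level str.split/str.count vs a per-char Python loop).

-- ===== PORT A =====
-- A's for-loop with early return at '?': structural recursion over the chars with the same state
-- (result list, current group counter).
def pvA_loop : List Char → List Int → Int → List Int
  | [], result, cur => if cur > 0 then result ++ [cur] else result
  | c :: rest, result, cur =>
    if c = '?' then result
    else
      let cur1 := if c = '#' then cur + 1 else cur
      if c = '.' then
        (if cur1 > 0 then pvA_loop rest (result ++ [cur1]) 0 else pvA_loop rest result cur1)
      else pvA_loop rest result cur1

def get_known_groups_of_hashes (hidden_spring : String) : List Int :=
  pvA_loop hidden_spring.toList [] 0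

-- ===== PORT B =====
-- Transliteration of Source B: parts = s.split('?', 1); segments = parts[0].split('.');
-- if len(parts) == 2: segments = segments[:-1]; return [seg.count('#') for seg in segments if '#' in seg].
-- parts[0]: split always returns a nonempty list, so pyGet?'s default branch is dead.
def get_known_groups_of_hashes_alt (hidden_spring : String) : List Int :=
  let parts := PySem.Chars.splitOnMax hidden_spring.toList ['?'] 1
  let segments := PySem.Chars.splitOn ((PySem.List.pyGet? parts 0).getD []) ['.']
  let segments := if parts.length = 2 then PySem.List.slice segments none (some (-1)) else segments
  (segments.filter (fun seg => PySem.Chars.isIn ['#'] seg)).map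
    (fun seg => (PySem.Chars.count seg ['#'] : Int))

-- ===== PRECONDITION & SPEC =====
def Spec_get_known_groups_of_hashes (hidden_spring : String) (out : List Int) : Prop := out = get_known_groups_of_hashes_alt hidden_spring
instance (hidden_spring : String) (out : List Int) : Decidable (Spec_get_known_groups_of_hashes hidden_spring out) := by unfold Spec_get_known_groups_of_hashes; infer_instance

-- ===== CLAIM (what is proved, stated in full; the proofs are below) =====
def Claim_equal_get_known_groups_of_hashes : Prop := ∀ (hidden_spring : String), Dom_get_known_groups_of_hashes hidden_spring → Spec_get_known_groups_of_hashes hidden_spring (get_known_groups_of_hashes hidden_spring)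

-- ===== LEMMAS AND PROOFS =====

-- Reference splitters (proof-only): split on '.' / first split at '?'.
def pvSplitDot : List Char → List (List Char)
  | [] => [[]]
  | c :: rest =>
    if c = '.' then [] :: pvSplitDot rest
    else match pvSplitDot rest with
      | [] => [[c]]
      | x :: xs => (c :: x) :: xs

def pvSplitQ : List Char → List (List Char)
  | [] => [[]]
  | c :: rest =>
    if c = '?' then [[], rest]
    else match pvSplitQ rest with
      | [] => [[c]]
      | x :: xs => (c :: x) :: xs

def pvConsHead (p : List Char) : List (List Char) → List (List Char)
  | [] => [p]
  | x :: xs => (p ++ x) :: xs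

-- A's loop with the already-emitted result stripped off.
def pvGA : List Char → Int → List Int
  | [], cur => if cur > 0 then [cur] else []
  | c :: rest, cur =>
    if c = '?' then []
    else
      let cur1 := if c = '#' then cur + 1 else cur
      if c = '.' then (if cur1 > 0 then cur1 :: pvGA rest 0 else pvGA rest cur1)
      else pvGA rest cur1

-- emit the groups of a segment list, `cur` hashes already pending for the head segment
def pvH : Int → List (List Char) → List Int
  | cur, [seg] => if cur + (seg.count '#' : Int) > 0 then [cur + (seg.count '#' : Int)] else []
  | cur, seg :: segs => (if cur + (seg.count '#' : Int) > 0 then [cur + (seg.count '#' : Int)] else []) ++ pvH 0 segs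
  | _, [] => []

-- same, but the last segment (the one touching '?') is dropped
def pvHQ : Int → List (List Char) → List Int
  | _, [_] => []
  | cur, seg :: segs => (if cur + (seg.count '#' : Int) > 0 then [cur + (seg.count '#' : Int)] else []) ++ pvHQ 0 segs
  | _, [] => []

theorem pvSplitDot_ne_nil (l : List Char) : pvSplitDot l ≠ [] := by
  cases l with
  | nil => simp [pvSplitDot]
  | cons c rest =>
    simp only [pvSplitDot]
    split_ifs
    · simp
    · cases h : pvSplitDot rest <;> simp

theorem pvSplitQ_ne_nil (l : List Char) : pvSplitQ l ≠ [] := by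
  cases l with
  | nil => simp [pvSplitQ]
  | cons c rest =>
    simp only [pvSplitQ]
    split_ifs
    · simp
    · cases h : pvSplitQ rest <;> simp

theorem pvSplitOn_go_dot (l : List Char) : ∀ (fuel : Nat) (cur : List Char) (acc : List (List Char)),
    l.length ≤ fuel →
    PySem.Chars.splitOn.go ['.'] fuel l cur acc = acc.reverse ++ pvConsHead cur.reverse (pvSplitDot l) := by
  induction l with
  | nil =>
    intro fuel cur acc _
    cases fuel <;> simp [PySem.Chars.splitOn.go, pvSplitDot, pvConsHead]
  | cons c rest ih =>
    intro fuel cur acc hlen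
    cases fuel with
    | zero => simp at hlen
    | succ f =>
      simp only [PySem.Chars.splitOn.go, List.isPrefixOf, List.length_cons] at *
      by_cases hc : c = '.'
      · rw [if_pos (by simp [hc])]
        simp only [List.length_nil, List.drop_succ_cons, List.drop_zero]
        rw [ih f [] (cur.reverse :: acc) (by omega)]
        cases h : pvSplitDot rest with
        | nil => exact absurd h (pvSplitDot_ne_nil rest)
        | cons x xs => simp [pvSplitDot, hc, h, pvConsHead]
      · rw [if_neg (by simp [Ne.symm hc])]
        rw [ih f (c :: cur) acc (by omega)]
        cases h : pvSplitDot rest with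
        | nil => exact absurd h (pvSplitDot_ne_nil rest)
        | cons x xs => simp [pvSplitDot, hc, h, pvConsHead]

theorem pvSplitOnMax_go_zero (sep : List Char) (fuel : Nat) (l cur : List Char) (acc : List (List Char)) :
    PySem.Chars.splitOnMax.go sep fuel 0 l cur acc = acc.reverse ++ [cur.reverse ++ l] := by
  cases fuel <;> cases l <;> simp [PySem.Chars.splitOnMax.go]

theorem pvSplitOnMax_go_q (l : List Char) : ∀ (fuel : Nat) (cur : List Char) (acc : List (List Char)),
    l.length ≤ fuel →
    PySem.Chars.splitOnMax.go ['?'] fuel 1 l cur acc = acc.reverse ++ pvConsHead cur.reverse (pvSplitQ l) := by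
  induction l with
  | nil =>
    intro fuel cur acc _
    cases fuel <;> simp [PySem.Chars.splitOnMax.go, pvSplitQ, pvConsHead]
  | cons c rest ih =>
    intro fuel cur acc hlen
    cases fuel with
    | zero => simp at hlen
    | succ f =>
      simp only [PySem.Chars.splitOnMax.go, List.isPrefixOf, List.length_cons, one_ne_zero,
        if_false] at *
      by_cases hc : c = '?'
      · rw [if_pos (by simp [hc])]
        simp only [List.length_nil, List.drop_succ_cons, List.drop_zero]
        rw [pvSplitOnMax_go_zero]
        simp [pvSplitQ, hc, pvConsHead]
      · rw [if_neg (by simp [Ne.symm hc])]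
        rw [ih f (c :: cur) acc (by omega)]
        cases h : pvSplitQ rest with
        | nil => exact absurd h (pvSplitQ_ne_nil rest)
        | cons x xs => simp [pvSplitQ, hc, h, pvConsHead]

theorem pvCount_go_hash (l : List Char) : ∀ (fuel : Nat) (acc : Nat),
    l.length ≤ fuel →
    PySem.Chars.count.go ['#'] fuel l acc = acc + l.count '#' := by
  induction l with
  | nil => intro fuel acc _; cases fuel <;> simp [PySem.Chars.count.go]
  | cons c rest ih =>
    intro fuel acc hlen
    cases fuel with
    | zero => simp at hlen
    | succ f =>
      simp only [PySem.Chars.count.go, List.isPrefixOf, List.length_cons] at *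
      by_cases hc : c = '#'
      · rw [if_pos (by simp [hc])]
        simp only [List.length_nil, List.drop_succ_cons, List.drop_zero]
        rw [ih f (acc + 1) (by omega)]
        simp [hc]
        omega
      · rw [if_neg (by simp [Ne.symm hc])]
        rw [ih f acc (by omega)]
        simp [hc]

theorem pvCount_hash (s : List Char) : PySem.Chars.count s ['#'] = s.count '#' := by
  simp only [PySem.Chars.count, List.isEmpty_cons, Bool.false_eq_true, if_false]
  exact (pvCount_go_hash s s.length 0 le_rfl).trans (Nat.zero_add _)

theorem pvIsIn_hash (s : List Char) : PySem.Chars.isIn ['#'] s = true ↔ '#' ∈ s := by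
  rw [PySem.Chars.isIn_iff_infix]
  exact List.singleton_infix_iff '#' s

theorem pvA_loop_eq (cs : List Char) : ∀ (result : List Int) (cur : Int),
    pvA_loop cs result cur = result ++ pvGA cs cur := by
  induction cs with
  | nil => intro result cur; simp only [pvA_loop, pvGA]; split_ifs <;> simp
  | cons c rest ih =>
    intro result cur
    simp only [pvA_loop, pvGA]
    split_ifs <;> simp_all

-- head-shift facts about the reference emitters
theorem pvH_hash_head (cur : Int) (x : List Char) (xs : List (List Char)) :
    pvH cur (('#' :: x) :: xs) = pvH (cur + 1) (x :: xs) := by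
  have e : cur + (List.count '#' ('#' :: x) : Int) = cur + 1 + (List.count '#' x : Int) := by
    simp; ring
  cases xs <;> simp only [pvH] <;> rw [e]

theorem pvH_other_head (c : Char) (hc : c ≠ '#') (cur : Int) (x : List Char) (xs : List (List Char)) :
    pvH cur ((c :: x) :: xs) = pvH cur (x :: xs) := by
  have e : cur + (List.count '#' (c :: x) : Int) = cur + (List.count '#' x : Int) := by
    simp [hc]
  cases xs <;> simp only [pvH] <;> rw [e]

theorem pvHQ_hash_head (cur : Int) (x : List Char) (xs : List (List Char)) :
    pvHQ cur (('#' :: x) :: xs) = pvHQ (cur + 1) (x :: xs) := by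
  have e : cur + (List.count '#' ('#' :: x) : Int) = cur + 1 + (List.count '#' x : Int) := by
    simp; ring
  cases xs <;> simp only [pvHQ] <;> rw [e]

theorem pvHQ_other_head (c : Char) (hc : c ≠ '#') (cur : Int) (x : List Char) (xs : List (List Char)) :
    pvHQ cur ((c :: x) :: xs) = pvHQ cur (x :: xs) := by
  have e : cur + (List.count '#' (c :: x) : Int) = cur + (List.count '#' x : Int) := by
    simp [hc]
  cases xs <;> simp only [pvHQ] <;> rw [e]

theorem pvGA_no_q (cs : List Char) (hq : '?' ∉ cs) : ∀ (cur : Int), 0 ≤ cur →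
    pvGA cs cur = pvH cur (pvSplitDot cs) := by
  induction cs with
  | nil => intro cur _; simp [pvGA, pvSplitDot, pvH]
  | cons c rest ih =>
    intro cur hcur
    have hc : c ≠ '?' := fun h => hq (h ▸ List.mem_cons_self)
    have hq' : '?' ∉ rest := fun h => hq (List.mem_cons_of_mem _ h)
    simp only [pvGA, if_neg hc]
    cases h : pvSplitDot rest with
    | nil => exact absurd h (pvSplitDot_ne_nil rest)
    | cons x xs =>
      by_cases hd : c = '.'
      · have hh : c ≠ '#' := by rw [hd]; decide
        simp only [if_neg hh, if_pos hd]
        rw [show pvSplitDot (c :: rest) = [] :: x :: xs by simp [pvSplitDot, hd, h]]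
        by_cases hpos : cur > 0
        · rw [if_pos hpos, ih hq' 0 le_rfl, h]
          simp [pvH, hpos]
        · have hz : cur = 0 := by omega
          rw [if_neg hpos, hz, ih hq' 0 le_rfl, h]
          simp [pvH]
      · by_cases hh : c = '#'
        · simp only [if_pos hh, if_neg hd]
          rw [show pvSplitDot (c :: rest) = (c :: x) :: xs by simp [pvSplitDot, hd, h]]
          rw [hh, pvH_hash_head, ← h, ih hq' (cur + 1) (by omega)]
        · simp only [if_neg hh, if_neg hd]
          rw [show pvSplitDot (c :: rest) = (c :: x) :: xs by simp [pvSplitDot, hd, h]]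
          rw [pvH_other_head c hh, ← h, ih hq' cur hcur]

theorem pvGA_q (cs : List Char) (hq : '?' ∈ cs) : ∀ (cur : Int), 0 ≤ cur →
    pvGA cs cur = pvHQ cur (pvSplitDot (cs.takeWhile (fun c => c ≠ '?'))) := by
  induction cs with
  | nil => simp at hq
  | cons c rest ih =>
    intro cur hcur
    by_cases hc : c = '?'
    · simp [pvGA, hc, List.takeWhile, pvSplitDot, pvHQ]
    · have hq' : '?' ∈ rest := by
        rcases List.mem_cons.mp hq with h | h
        · exact absurd h.symm hc
        · exact h
      have htw : (c :: rest).takeWhile (fun c => c ≠ '?') = c :: rest.takeWhile (fun c => c ≠ '?') := by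
        simp [hc]
      simp only [pvGA, if_neg hc, htw]
      cases h : pvSplitDot (rest.takeWhile (fun c => c ≠ '?')) with
      | nil => exact absurd h (pvSplitDot_ne_nil _)
      | cons x xs =>
        by_cases hd : c = '.'
        · have hh : c ≠ '#' := by rw [hd]; decide
          simp only [if_neg hh, if_pos hd]
          rw [show pvSplitDot (c :: rest.takeWhile (fun c => c ≠ '?')) = [] :: x :: xs by
            simp only [pvSplitDot, if_pos hd]; rw [h]]
          by_cases hpos : cur > 0
          · rw [if_pos hpos, ih hq' 0 le_rfl, h]
            simp [pvHQ, hpos]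
          · have hz : cur = 0 := by omega
            rw [if_neg hpos, hz, ih hq' 0 le_rfl, h]
            simp [pvHQ]
        · by_cases hh : c = '#'
          · simp only [if_pos hh, if_neg hd]
            rw [show pvSplitDot (c :: rest.takeWhile (fun c => c ≠ '?')) = (c :: x) :: xs by
              simp only [pvSplitDot, if_neg hd]; rw [h]]
            rw [hh, pvHQ_hash_head, ← h, ih hq' (cur + 1) (by omega)]
          · simp only [if_neg hh, if_neg hd]
            rw [show pvSplitDot (c :: rest.takeWhile (fun c => c ≠ '?')) = (c :: x) :: xs by
              simp only [pvSplitDot, if_neg hd]; rw [h]]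
            rw [pvHQ_other_head c hh, ← h, ih hq' cur hcur]

theorem pvH_zero (segs : List (List Char)) :
    pvH 0 segs = (segs.filter (fun seg => PySem.Chars.isIn ['#'] seg)).map
      (fun seg => (PySem.Chars.count seg ['#'] : Int)) := by
  induction segs with
  | nil => simp [pvH]
  | cons seg segs ih =>
    by_cases hmem : '#' ∈ seg
    · have hin : PySem.Chars.isIn ['#'] seg = true := (pvIsIn_hash seg).mpr hmem
      have hpos : 0 < seg.count '#' := List.count_pos_iff.mpr hmem
      cases segs with
      | nil =>
        simp only [pvH, List.filter, hin, List.map]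
        rw [if_pos (by omega)]
        simp [pvCount_hash]
      | cons b t =>
        simp only [pvH, List.filter, hin, List.map, ih]
        rw [if_pos (by omega)]
        simp [pvCount_hash]
    · have hin : PySem.Chars.isIn ['#'] seg = false := by
        cases h : PySem.Chars.isIn ['#'] seg
        · rfl
        · exact absurd ((pvIsIn_hash seg).mp h) hmem
      have hzero : seg.count '#' = 0 := by
        rw [List.count_eq_zero]; exact hmem
      cases segs with
      | nil => simp [pvH, List.filter, hin, hzero]
      | cons b t => simp [pvH, List.filter, hin, hzero, ih]

theorem pvHQ_zero (segs : List (List Char)) :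
    pvHQ 0 segs = ((segs.dropLast).filter (fun seg => PySem.Chars.isIn ['#'] seg)).map
      (fun seg => (PySem.Chars.count seg ['#'] : Int)) := by
  induction segs with
  | nil => simp [pvHQ]
  | cons seg segs ih =>
    cases segs with
    | nil => simp [pvHQ]
    | cons b t =>
      have hdl : (seg :: b :: t).dropLast = seg :: (b :: t).dropLast := by
        simp [List.dropLast_cons_of_ne_nil]
      by_cases hmem : '#' ∈ seg
      · have hin : PySem.Chars.isIn ['#'] seg = true := (pvIsIn_hash seg).mpr hmem
        have hpos : 0 < seg.count '#' := List.count_pos_iff.mpr hmem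
        simp only [pvHQ, ih, hdl, List.filter, hin, List.map]
        rw [if_pos (by omega)]
        simp [pvCount_hash]
      · have hin : PySem.Chars.isIn ['#'] seg = false := by
          cases h : PySem.Chars.isIn ['#'] seg
          · rfl
          · exact absurd ((pvIsIn_hash seg).mp h) hmem
        have hzero : seg.count '#' = 0 := by
          rw [List.count_eq_zero]; exact hmem
        simp [pvHQ, ih, hdl, hin, hzero]

theorem pvSplitQ_no_q (cs : List Char) (hq : '?' ∉ cs) : pvSplitQ cs = [cs] := by
  induction cs with
  | nil => simp [pvSplitQ]
  | cons c rest ih =>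
    have hc : c ≠ '?' := fun h => hq (h ▸ List.mem_cons_self)
    have hq' : '?' ∉ rest := fun h => hq (List.mem_cons_of_mem _ h)
    simp [pvSplitQ, hc, ih hq']

theorem pvSplitQ_q (cs : List Char) (hq : '?' ∈ cs) :
    ∃ r, pvSplitQ cs = [cs.takeWhile (fun c => c ≠ '?'), r] := by
  induction cs with
  | nil => simp at hq
  | cons c rest ih =>
    by_cases hc : c = '?'
    · exact ⟨rest, by simp [pvSplitQ, hc, List.takeWhile]⟩
    · have hq' : '?' ∈ rest := by
        rcases List.mem_cons.mp hq with h | h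
        · exact absurd h.symm hc
        · exact h
      obtain ⟨r, hr⟩ := ih hq'
      exact ⟨r, by simp [pvSplitQ, hc, hr]⟩

theorem pvSplitOn_dot (s : List Char) : PySem.Chars.splitOn s ['.'] = pvSplitDot s := by
  rw [PySem.Chars.splitOn, pvSplitOn_go_dot s (s.length + 1) [] [] (by omega)]
  cases h : pvSplitDot s with
  | nil => exact absurd h (pvSplitDot_ne_nil s)
  | cons x xs => simp [pvConsHead]

theorem pvSplitOnMax_q (s : List Char) : PySem.Chars.splitOnMax s ['?'] 1 = pvSplitQ s := by
  rw [PySem.Chars.splitOnMax, if_neg (by omega)]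
  have h1 : (1 : Int).toNat = 1 := rfl
  rw [h1, pvSplitOnMax_go_q s (s.length + 1) [] [] (by omega)]
  cases h : pvSplitQ s with
  | nil => exact absurd h (pvSplitQ_ne_nil s)
  | cons x xs => simp [pvConsHead]

-- ===== VERDICT (by name: the statement is the Claim_ definition above) =====
theorem get_known_groups_of_hashes_spec : Claim_equal_get_known_groups_of_hashes := by
  intro s _
  unfold Spec_get_known_groups_of_hashes get_known_groups_of_hashes get_known_groups_of_hashes_alt
  rw [pvA_loop_eq, pvSplitOnMax_q]
  simp only [List.nil_append]
  by_cases hq : '?' ∈ s.toList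
  · obtain ⟨r, hr⟩ := pvSplitQ_q s.toList hq
    rw [pvGA_q s.toList hq 0 le_rfl, hr]
    simp only [List.length_cons, List.length_nil]
    rw [if_pos trivial]
    have hget : (PySem.List.pyGet? [s.toList.takeWhile (fun c => c ≠ '?'), r] 0).getD [] =
        s.toList.takeWhile (fun c => c ≠ '?') := by
      simp [PySem.List.pyGet?, PySem.List.pyIdx?]
    rw [hget, pvSplitOn_dot]
    have hslice : PySem.List.slice (pvSplitDot (s.toList.takeWhile (fun c => c ≠ '?'))) none (some (-1)) =
        (pvSplitDot (s.toList.takeWhile (fun c => c ≠ '?'))).dropLast := by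
      simp [pysem]
    rw [hslice, pvHQ_zero]
  · rw [pvGA_no_q s.toList hq 0 le_rfl, pvSplitQ_no_q s.toList hq]
    simp only [List.length_cons, List.length_nil]
    rw [if_neg (by omega)]
    have hget : (PySem.List.pyGet? [s.toList] 0).getD [] = s.toList := by
      simp [PySem.List.pyGet?, PySem.List.pyIdx?]
    rw [hget, pvSplitOn_dot, pvH_zero]
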